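-- pv_equiv track=rewrite | github.com/tershivskynazar-cpu/power-outage-bot | scheduler.py | _schedules_equal
-- ===== SOURCE A (Python) =====
-- from typing import List, Optional, Dict
--
-- def _schedules_equal(schedule1: List[List[str]], schedule2: List[List[str]]) -> bool:
--     if len(schedule1) != len(schedule2):
--         return False
--
--     schedule1_sorted = sorted(schedule1, key=lambda x: x[0])
--     schedule2_sorted = sorted(schedule2, key=lambda x: x[0])
--
--     for interval1, interval2 in zip(schedule1_sorted, schedule2_sorted):
--         if interval1[0] != interval2[0] or interval1[1] != interval2[1]:
--             return False
--
--     return True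
-- ===== SOURCE B (Python) =====
-- def _schedules_equal(schedule1, schedule2):
--     if len(schedule1) != len(schedule2):
--         return False
--
--     def _buckets(schedule):
--         buckets = {}
--         for interval in schedule:
--             buckets.setdefault(interval[0], []).append(interval[1])
--         return buckets
--
--     return _buckets(schedule1) == _buckets(schedule2)
-- ===== Notes on version B (the rewrite author's own statement) =====
-- stated objective: alternative
-- what changed: Replaces the two stable sorts plus positional zip-comparison with a single pass that groups each schedule into a dict start-key -> list of end values (insertion order) and compares the two dicts as maps.
-- outside the precondition, e.g. on _schedules_equal([['a']], [['b']]): A returns False, B raises IndexError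
import Mathlib
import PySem

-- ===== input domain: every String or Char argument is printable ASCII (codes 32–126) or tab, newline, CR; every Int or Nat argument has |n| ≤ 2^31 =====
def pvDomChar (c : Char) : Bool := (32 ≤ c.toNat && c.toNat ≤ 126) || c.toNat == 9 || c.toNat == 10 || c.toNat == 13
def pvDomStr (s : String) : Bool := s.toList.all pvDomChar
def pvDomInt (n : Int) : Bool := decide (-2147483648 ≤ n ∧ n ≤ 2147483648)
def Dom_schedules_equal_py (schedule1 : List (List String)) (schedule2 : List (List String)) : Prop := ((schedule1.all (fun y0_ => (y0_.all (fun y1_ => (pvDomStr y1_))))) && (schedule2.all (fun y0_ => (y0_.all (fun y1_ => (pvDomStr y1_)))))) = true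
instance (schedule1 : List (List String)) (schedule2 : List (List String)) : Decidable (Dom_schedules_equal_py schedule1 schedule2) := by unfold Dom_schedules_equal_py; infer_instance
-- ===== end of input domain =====

-- B replaces A's two stable sorts + positional comparison by a one-pass grouping of each
-- schedule into a dict (start key -> list of end values, insertion order) compared as maps;
-- same return value on Pre_ (A mutates nothing; return values only).

-- interval[0] / interval[1]: exact (= Python's indexing) whenever the interval has ≥ 2
-- fields, which Pre_ guarantees on every branch that evaluates them.
def pvKey0 (iv : List String) : String := (PySem.List.pyGet? iv 0).getD ""
def pvKey1 (iv : List String) : String := (PySem.List.pyGet? iv 1).getD ""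

-- ===== PORT A =====
-- the for-loop over zip(schedule1_sorted, schedule2_sorted) with its early `return False`
def pvEqLoopA : List (List String × List String) → Bool
  | [] => true
  | (a, b) :: rest =>
      if (pvKey0 a != pvKey0 b) || (pvKey1 a != pvKey1 b) then false else pvEqLoopA rest

def schedules_equal_py (schedule1 : List (List String)) (schedule2 : List (List String)) : Bool :=
  if schedule1.length != schedule2.length then false
  else
    let schedule1_sorted := PySem.List.sorted schedule1 (fun x => pvKey0 x)
    let schedule2_sorted := PySem.List.sorted schedule2 (fun x => pvKey0 x)
    pvEqLoopA (schedule1_sorted.zip schedule2_sorted)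

-- ===== PORT B =====
-- Source B's grouping loop: buckets.setdefault(iv[0], []).append(iv[1]), i.e.
-- buckets[iv[0]] = buckets.get(iv[0], []) + [iv[1]]  =  Dict.modify (PySem's grouping pattern)
def pvBuckets (schedule : List (List String)) : PySem.Dict String (List String) :=
  schedule.foldl (fun d iv => d.modify (pvKey0 iv) [] (fun v => v ++ [pvKey1 iv])) PySem.Dict.empty

-- Python's `dict ==` (order-insensitive): same size and every key of d1 maps equally in d2
def pvDictEq (d1 d2 : PySem.Dict String (List String)) : Bool :=
  (d1.size == d2.size) && d1.keys.all (fun k => d2.contains k && (d2.getD k [] == d1.getD k []))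

def schedules_equal_py_alt (schedule1 : List (List String)) (schedule2 : List (List String)) : Bool :=
  if schedule1.length != schedule2.length then false
  else pvDictEq (pvBuckets schedule1) (pvBuckets schedule2)

-- ===== PRECONDITION & SPEC =====
-- Pre_ excludes equal-length schedules containing an interval with fewer than 2 fields:
-- there the Python A raises IndexError, except when a start-key mismatch triggers the early
-- `return False` before the missing field is touched — and on those B itself raises.
def Pre_schedules_equal_py (schedule1 : List (List String)) (schedule2 : List (List String)) : Prop :=
  schedule1.length ≠ schedule2.length ∨
    ((∀ iv ∈ schedule1, 2 ≤ iv.length) ∧ (∀ iv ∈ schedule2, 2 ≤ iv.length))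
instance (schedule1 : List (List String)) (schedule2 : List (List String)) : Decidable (Pre_schedules_equal_py schedule1 schedule2) := by unfold Pre_schedules_equal_py; infer_instance

def pvWitness_schedules_equal_py : List (List String) × List (List String) :=
  ([["09:00", "12:00"]], [["09:00", "12:00"]])

def Spec_schedules_equal_py (schedule1 : List (List String)) (schedule2 : List (List String)) (out : Bool) : Prop := out = schedules_equal_py_alt schedule1 schedule2
instance (schedule1 : List (List String)) (schedule2 : List (List String)) (out : Bool) : Decidable (Spec_schedules_equal_py schedule1 schedule2 out) := by unfold Spec_schedules_equal_py; infer_instance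

-- ===== CLAIM (what is proved, stated in full; the proofs are below) =====
def Claim_equal_schedules_equal_py : Prop := ∀ (schedule1 : List (List String)) (schedule2 : List (List String)), Dom_schedules_equal_py schedule1 schedule2 → Pre_schedules_equal_py schedule1 schedule2 → Spec_schedules_equal_py schedule1 schedule2 (schedules_equal_py schedule1 schedule2)

-- ===== LEMMAS AND PROOFS =====

-- the (start, end) fields A actually compares
def pvProj (iv : List String) : String × String := (pvKey0 iv, pvKey1 iv)

lemma eqLoop_eq_beq (l1 : List (List String)) (l2 : List (List String))
    (h : l1.length = l2.length) :
    pvEqLoopA (l1.zip l2) = (l1.map pvProj == l2.map pvProj) := by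
  induction l1 generalizing l2 with
  | nil => cases l2 with
    | nil => simp [pvEqLoopA]
    | cons b t => simp at h
  | cons a t1 ih =>
    cases l2 with
    | nil => simp at h
    | cons b t2 =>
      simp only [List.length_cons, Nat.add_right_cancel_iff] at h
      simp only [List.zip_cons_cons, pvEqLoopA, List.map_cons]
      by_cases h0 : pvKey0 a = pvKey0 b <;> by_cases h1 : pvKey1 a = pvKey1 b <;>
        simp [h0, h1, ih t2 h, pvProj, List.cons_beq_cons]

lemma map_insertBy (x : List String) (acc : List (List String)) :
    (PySem.List.insertBy (fun a b => decide (pvKey0 a < pvKey0 b)) x acc).map pvProj =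
      PySem.List.insertBy (fun a b => decide (a.1 < b.1)) (pvProj x) (acc.map pvProj) := by
  induction acc with
  | nil => simp [PySem.List.insertBy]
  | cons y ys ih =>
    simp only [PySem.List.insertBy, List.map_cons, pvProj, decide_eq_true_eq]
    simp only [pvProj] at ih
    by_cases h : pvKey0 x < pvKey0 y
    · rw [if_pos h, if_pos h]
      simp [pvProj]
    · rw [if_neg h, if_neg h, List.map_cons, ih]
      rfl

lemma map_sorted (s : List (List String)) :
    (PySem.List.sorted s (fun x => pvKey0 x)).map pvProj =
      PySem.List.sorted (s.map pvProj) (fun p => p.1) := by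
  rw [PySem.List.sorted_eq_foldl_insertBy, PySem.List.sorted_eq_foldl_insertBy, List.foldl_map]
  have : ∀ (acc : List (List String)),
      (s.foldl (fun acc x => PySem.List.insertBy (fun a b => decide (pvKey0 a < pvKey0 b)) x acc) acc).map pvProj =
      s.foldl (fun acc x => PySem.List.insertBy (fun a b => decide (a.1 < b.1)) (pvProj x) acc) (acc.map pvProj) := by
    induction s with
    | nil => intro acc; rfl
    | cons a t ih => intro acc; simp only [List.foldl_cons, ih, map_insertBy]
  exact this []

lemma filter_insertBy (x : String × String) (acc : List (String × String)) (k : String)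
    (hs : acc.Pairwise (fun a b => a.1 ≤ b.1)) :
    (PySem.List.insertBy (fun a b => decide (a.1 < b.1)) x acc).filter (fun p => p.1 == k) =
      acc.filter (fun p => p.1 == k) ++ (if x.1 == k then [x] else []) := by
  induction acc with
  | nil => by_cases h : x.1 = k <;> simp [PySem.List.insertBy, h]
  | cons y ys ih =>
    rcases List.pairwise_cons.mp hs with ⟨hy, hys⟩
    simp only [PySem.List.insertBy, decide_eq_true_eq]
    by_cases h : x.1 < y.1
    · rw [if_pos h]
      by_cases hx : x.1 = k
      · have hemp : (y :: ys).filter (fun p => p.1 == k) = [] := by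
          rw [List.filter_eq_nil_iff]
          intro p hp
          simp only [beq_iff_eq]
          intro hpk
          have hyp : y.1 ≤ p.1 := by
            rcases List.mem_cons.mp hp with rfl | hp'
            · exact le_refl _
            · exact hy p hp'
          have h2 := lt_of_lt_of_le h hyp
          rw [hx, hpk] at h2
          exact lt_irrefl _ h2
        rw [List.filter_cons_of_pos (by simpa using hx), hemp, if_pos (by simpa using hx)]
        rfl
      · rw [List.filter_cons_of_neg (by simpa using hx), if_neg (by simpa using hx)]
        simp
    · rw [if_neg h, List.filter_cons, List.filter_cons, ih hys]
      by_cases hyk : y.1 = k <;> simp [hyk]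

lemma pairwise_insertBy (x : String × String) (acc : List (String × String))
    (hs : acc.Pairwise (fun a b => a.1 ≤ b.1)) :
    (PySem.List.insertBy (fun a b => decide (a.1 < b.1)) x acc).Pairwise
      (fun a b => a.1 ≤ b.1) := by
  induction acc with
  | nil => simp [PySem.List.insertBy]
  | cons y ys ih =>
    simp only [PySem.List.insertBy]
    rcases List.pairwise_cons.mp hs with ⟨hy, hys⟩
    simp only [decide_eq_true_eq]
    by_cases h : x.1 < y.1
    · rw [if_pos h]
      refine List.pairwise_cons.mpr ⟨?_, hs⟩
      intro p hp
      rcases hp with _ | hp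
      · exact le_of_lt h
      · exact le_of_lt (lt_of_lt_of_le h (hy p (by assumption)))
    · rw [if_neg h]
      refine List.pairwise_cons.mpr ⟨?_, ih hys⟩
      intro p hp
      rcases (PySem.List.mem_insertBy _ _ _ _).mp hp with rfl | hp
      · exact le_of_not_gt h
      · exact hy p hp

lemma filter_foldl_insertBy (t : List (String × String)) (acc : List (String × String)) (k : String)
    (hs : acc.Pairwise (fun a b => a.1 ≤ b.1)) :
    (t.foldl (fun acc x => PySem.List.insertBy (fun a b => decide (a.1 < b.1)) x acc) acc).filter
        (fun p => p.1 == k) =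
      acc.filter (fun p => p.1 == k) ++ t.filter (fun p => p.1 == k) := by
  induction t generalizing acc with
  | nil => simp
  | cons x ts ih =>
    simp only [List.foldl_cons]
    rw [ih _ (pairwise_insertBy x acc hs), filter_insertBy x acc k hs, List.filter_cons]
    by_cases hx : x.1 = k <;> simp [hx]

lemma filter_sorted (t : List (String × String)) (k : String) :
    (PySem.List.sorted t (fun p => p.1)).filter (fun p => p.1 == k) =
      t.filter (fun p => p.1 == k) := by
  rw [PySem.List.sorted_eq_foldl_insertBy]
  simpa using filter_foldl_insertBy t [] k (by simp)

lemma eq_of_filters_eq (l1 l2 : List (String × String))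
    (h1 : l1.Pairwise (fun a b => a.1 ≤ b.1)) (h2 : l2.Pairwise (fun a b => a.1 ≤ b.1))
    (h : ∀ k, l1.filter (fun p => p.1 == k) = l2.filter (fun p => p.1 == k)) :
    l1 = l2 := by
  induction l1 generalizing l2 with
  | nil =>
    cases l2 with
    | nil => rfl
    | cons b t2 =>
      have := h b.1
      rw [List.filter_cons_of_pos (by simp)] at this
      simp at this
  | cons a t1 ih =>
    cases l2 with
    | nil =>
      have := h a.1
      rw [List.filter_cons_of_pos (by simp)] at this
      simp at this
    | cons b t2 =>
      rcases List.pairwise_cons.mp h1 with ⟨ha, ht1⟩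
      rcases List.pairwise_cons.mp h2 with ⟨hb, ht2⟩
      have hab : a = b := by
        by_cases hk : b.1 = a.1
        · have := h a.1
          rw [List.filter_cons_of_pos (by simp), List.filter_cons_of_pos (by simp [hk])] at this
          exact (List.cons.injEq _ _ _ _ ▸ this).1
        · exfalso
          -- some element of t2 has key a.1
          have hA := h a.1
          rw [List.filter_cons_of_pos (by simp), List.filter_cons_of_neg (by simp [hk])] at hA
          have hmem : ∃ p ∈ t2, p.1 = a.1 := by
            have : a ∈ t2.filter (fun p => p.1 == a.1) := by rw [← hA]; simp
            rcases List.mem_filter.mp this with ⟨hm, hq⟩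
            exact ⟨a, hm, rfl⟩
          rcases hmem with ⟨p, hp, hpk⟩
          have hba : b.1 ≤ a.1 := hpk ▸ hb p hp
          -- some element of t1 has key b.1
          have hB := h b.1
          rw [List.filter_cons_of_neg (by simp; exact fun hh => hk hh.symm), List.filter_cons_of_pos (by simp)] at hB
          have hmem2 : ∃ q ∈ t1, q.1 = b.1 := by
            have : b ∈ t1.filter (fun p => p.1 == b.1) := by rw [hB]; simp
            rcases List.mem_filter.mp this with ⟨hm, hq⟩
            exact ⟨b, hm, rfl⟩
          rcases hmem2 with ⟨q, hq, hqk⟩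
          have hab' : a.1 ≤ b.1 := hqk ▸ ha q hq
          exact hk (le_antisymm hba hab')
      subst hab
      have htails : ∀ k, t1.filter (fun p => p.1 == k) = t2.filter (fun p => p.1 == k) := by
        intro k
        have := h k
        by_cases hk : a.1 = k
        · rw [List.filter_cons_of_pos (by simpa using hk), List.filter_cons_of_pos (by simpa using hk)] at this
          exact (List.cons.injEq _ _ _ _ ▸ this).2
        · rwa [List.filter_cons_of_neg (by simpa using hk), List.filter_cons_of_neg (by simpa using hk)] at this
      exact congrArg (a :: ·) (ih t2 ht1 ht2 htails)

lemma sorted_eq_iff_filters (t1 t2 : List (String × String)) :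
    PySem.List.sorted t1 (fun p => p.1) = PySem.List.sorted t2 (fun p => p.1) ↔
      ∀ k, t1.filter (fun p => p.1 == k) = t2.filter (fun p => p.1 == k) := by
  constructor
  · intro h k
    rw [← filter_sorted t1 k, ← filter_sorted t2 k, h]
  · intro h
    refine eq_of_filters_eq _ _ (PySem.List.sorted_pairwise _ _) (PySem.List.sorted_pairwise _ _) ?_
    intro k
    rw [filter_sorted, filter_sorted]
    exact h k


lemma buckets_getD (s : List (List String)) (k : String) :
    (pvBuckets s).getD k [] =
      ((s.map pvProj).filter (fun p => p.1 == k)).map (fun p => p.2) := by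
  have h : pvBuckets s = List.foldl
      (fun d (p : String × String) => d.modify p.1 [] (fun v => v ++ [p.2]))
      PySem.Dict.empty (s.map pvProj) := by
    rw [List.foldl_map]; rfl
  rw [h, PySem.Dict.getD_foldl_modify_append]
  simp

lemma buckets_keys_nodup (s : List (List String)) : (pvBuckets s).keys.Nodup := by
  unfold pvBuckets
  exact PySem.Dict.nodup_keys_foldl_modify_key s pvKey0 [] (fun d iv v => v ++ [pvKey1 iv]) _ (by simp [PySem.Dict.empty])

lemma buckets_contains (s : List (List String)) (k : String) :
    (pvBuckets s).contains k = true ↔ k ∈ (s.map pvProj).map Prod.fst := by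
  rw [PySem.Dict.contains_iff_mem_keys]
  unfold pvBuckets
  rw [PySem.Dict.keys_foldl_modify_key s pvKey0 [] (fun d iv v => v ++ [pvKey1 iv])]
  rw [PySem.Set.mem_update]
  simp [PySem.Dict.empty, pvProj, PySem.Dict.keys]

lemma mem_map_fst_iff_filter_ne (t : List (String × String)) (k : String) :
    k ∈ t.map Prod.fst ↔ t.filter (fun p => p.1 == k) ≠ [] := by
  rw [Ne, List.filter_eq_nil_iff]
  simp only [List.mem_map, beq_iff_eq, not_forall]
  constructor
  · rintro ⟨p, hp, rfl⟩; exact ⟨p, hp, by simp⟩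
  · rintro ⟨p, hp, hk⟩; exact ⟨p, hp, by simpa using hk⟩

lemma filter_eq_of_map_snd (l1 l2 : List (String × String)) (k : String)
    (h1 : ∀ p ∈ l1, p.1 = k) (h2 : ∀ p ∈ l2, p.1 = k)
    (h : l1.map Prod.snd = l2.map Prod.snd) : l1 = l2 := by
  induction l1 generalizing l2 with
  | nil => cases l2 with
    | nil => rfl
    | cons b t2 => simp at h
  | cons a t1 ih =>
    cases l2 with
    | nil => simp at h
    | cons b t2 =>
      simp only [List.map_cons, List.cons.injEq] at h
      have hab : a = b := by
        have := (h1 a (by simp)).trans (h2 b (by simp)).symm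
        exact Prod.ext this h.1
      exact hab ▸ congrArg (a :: ·)
        (ih t2 (fun p hp => h1 p (List.mem_cons_of_mem a hp))
          (fun p hp => h2 p (List.mem_cons_of_mem b hp)) h.2)

lemma size_eq_keys_length (d : PySem.Dict String (List String)) : d.size = d.keys.length := by
  simp [PySem.Dict.size, PySem.Dict.keys]

lemma dictEq_iff (s1 s2 : List (List String)) :
    pvDictEq (pvBuckets s1) (pvBuckets s2) = true ↔
      ∀ k, (s1.map pvProj).filter (fun p => p.1 == k) =
             (s2.map pvProj).filter (fun p => p.1 == k) := by
  have hfilt : ∀ (s : List (List String)) k,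
      ((pvBuckets s).contains k = true) ↔ (s.map pvProj).filter (fun p => p.1 == k) ≠ [] := by
    intro s k; rw [buckets_contains, mem_map_fst_iff_filter_ne]
  have hkall : ∀ (s : List (List String)) (p : String × String) k,
      p ∈ (s.map pvProj).filter (fun q => q.1 == k) → p.1 = k := by
    intro s p k hp; simpa using (List.mem_filter.mp hp).2
  constructor
  · intro h
    simp only [pvDictEq, Bool.and_eq_true, beq_iff_eq, List.all_eq_true] at h
    rcases h with ⟨hsz, hall⟩
    -- keys of B1 ⊆ keys of B2, nodup both, equal length ⇒ same key set
    have hsub : (pvBuckets s1).keys ⊆ (pvBuckets s2).keys := by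
      intro k hk
      rcases hall k hk with ⟨hc, _⟩
      exact (PySem.Dict.contains_iff_mem_keys _ _).mp hc
    have hperm : (pvBuckets s1).keys.Perm (pvBuckets s2).keys := by
      apply List.Subperm.perm_of_length_le
      · exact List.subperm_of_subset (buckets_keys_nodup s1) hsub
      · rw [← size_eq_keys_length, ← size_eq_keys_length, hsz]
    intro k
    by_cases hk : k ∈ (pvBuckets s1).keys
    · rcases hall k hk with ⟨_, hv⟩
      rw [buckets_getD, buckets_getD] at hv
      exact filter_eq_of_map_snd _ _ k (fun p hp => hkall s1 p k hp)
        (fun p hp => hkall s2 p k hp) hv.symm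
    · have h1 : (s1.map pvProj).filter (fun p => p.1 == k) = [] := by
        by_contra hne
        exact hk ((PySem.Dict.contains_iff_mem_keys _ _).mp ((hfilt s1 k).mpr hne))
      have h2 : (s2.map pvProj).filter (fun p => p.1 == k) = [] := by
        by_contra hne
        exact hk (hperm.mem_iff.mpr ((PySem.Dict.contains_iff_mem_keys _ _).mp ((hfilt s2 k).mpr hne)))
      rw [h1, h2]
  · intro h
    have hkeys : ∀ k, k ∈ (pvBuckets s1).keys ↔ k ∈ (pvBuckets s2).keys := by
      intro k
      rw [← PySem.Dict.contains_iff_mem_keys, ← PySem.Dict.contains_iff_mem_keys,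
        hfilt s1 k, hfilt s2 k, h k]
    have hperm : (pvBuckets s1).keys.Perm (pvBuckets s2).keys :=
      (List.perm_ext_iff_of_nodup (buckets_keys_nodup s1) (buckets_keys_nodup s2)).mpr hkeys
    have hsz : (pvBuckets s1).size = (pvBuckets s2).size := by
      rw [size_eq_keys_length, size_eq_keys_length, hperm.length_eq]
    simp only [pvDictEq, Bool.and_eq_true, beq_iff_eq, List.all_eq_true]
    refine ⟨hsz, ?_⟩
    intro k hk
    refine ⟨(PySem.Dict.contains_iff_mem_keys _ _).mpr ((hkeys k).mp hk), ?_⟩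
    rw [buckets_getD, buckets_getD, h k]

-- ===== VERDICT (by name: the statement is the Claim_ definition above) =====
theorem schedules_equal_py_spec : Claim_equal_schedules_equal_py := by
  intro s1 s2 _ _
  unfold Spec_schedules_equal_py schedules_equal_py schedules_equal_py_alt
  by_cases hlen : s1.length = s2.length
  · simp only [hlen, bne_self_eq_false, Bool.false_eq_true, if_false]
    have hl : (PySem.List.sorted s1 (fun x => pvKey0 x)).length =
        (PySem.List.sorted s2 (fun x => pvKey0 x)).length := by
      rw [PySem.List.length_sorted, PySem.List.length_sorted, hlen]
    rw [eqLoop_eq_beq _ _ hl, map_sorted, map_sorted, Bool.eq_iff_iff, beq_iff_eq,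
      sorted_eq_iff_filters, dictEq_iff]
  · simp [bne_iff_ne, hlen]
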